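-- pv_equiv track=rewrite | github.com/i227433/reconnaissance-tool | reports/report_generator.py | _format_recommendations_text
-- ===== SOURCE A (Python) =====
-- from typing import Dict, Any, List, Optional
--
-- def _format_recommendations_text(recommendations: List[Dict[str, Any]]) -> List[str]:
--     """Format recommendations for text report."""
--     lines = ["RECOMMENDATIONS", "=" * 40]
--
--     if not recommendations:
--         lines.extend([
--             "• Continue regular security assessments",
--             "• Keep all software and systems updated",
--             "• Monitor for new vulnerabilities",
--             ""
--         ])
--         return lines
--
--     # Group by priority
--     high_priority = [r for r in recommendations if r.get('priority') == 'High']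
--     medium_priority = [r for r in recommendations if r.get('priority') == 'Medium']
--     low_priority = [r for r in recommendations if r.get('priority') == 'Low']
--
--     for priority_group, title in [(high_priority, "High Priority"),
--                                  (medium_priority, "Medium Priority"),
--                                  (low_priority, "Low Priority")]:
--         if priority_group:
--             lines.extend([f"{title} Recommendations:", ""])
--             for rec in priority_group:
--                 lines.extend([
--                     f"• {rec.get('title', 'Unknown')}",
--                     f"  Category: {rec.get('category', 'General')}",
--                     f"  Description: {rec.get('description', 'No description')}",
--                     f"  Implementation: {rec.get('implementation', 'See documentation')}",
--                     ""
--                 ])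
--
--     return lines
-- ===== SOURCE B (Python) =====
-- from typing import Dict, Any, List
--
-- _RANK = {'High': 0, 'Medium': 1, 'Low': 2}
-- _TITLES = ('High Priority', 'Medium Priority', 'Low Priority')
--
-- def _format_recommendations_text(recommendations: List[Dict[str, Any]]) -> List[str]:
--     """Format recommendations: stable-sort by priority rank, then one scan
--     emitting a group header whenever the rank changes."""
--     lines = ["RECOMMENDATIONS", "=" * 40]
--     if not recommendations:
--         lines += [
--             "• Continue regular security assessments",
--             "• Keep all software and systems updated",
--             "• Monitor for new vulnerabilities",
--             "",
--         ]
--         return lines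
--     keyed = sorted((r for r in recommendations if r.get('priority') in _RANK),
--                    key=lambda r: _RANK[r.get('priority')])
--     prev = None
--     for rec in keyed:
--         rank = _RANK[rec.get('priority')]
--         if rank != prev:
--             lines += [f"{_TITLES[rank]} Recommendations:", ""]
--             prev = rank
--         lines += [
--             f"• {rec.get('title', 'Unknown')}",
--             f"  Category: {rec.get('category', 'General')}",
--             f"  Description: {rec.get('description', 'No description')}",
--             f"  Implementation: {rec.get('implementation', 'See documentation')}",
--             "",
--         ]
--     return lines
-- ===== Notes on version B (the rewrite author's own statement) =====
-- stated objective: alternative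
-- what changed: Instead of filtering the list three times (one pass per priority group), B stable-sorts the known-priority records once by a numeric rank and emits everything in a single scan that inserts a group header whenever the rank changes.
import Mathlib
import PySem

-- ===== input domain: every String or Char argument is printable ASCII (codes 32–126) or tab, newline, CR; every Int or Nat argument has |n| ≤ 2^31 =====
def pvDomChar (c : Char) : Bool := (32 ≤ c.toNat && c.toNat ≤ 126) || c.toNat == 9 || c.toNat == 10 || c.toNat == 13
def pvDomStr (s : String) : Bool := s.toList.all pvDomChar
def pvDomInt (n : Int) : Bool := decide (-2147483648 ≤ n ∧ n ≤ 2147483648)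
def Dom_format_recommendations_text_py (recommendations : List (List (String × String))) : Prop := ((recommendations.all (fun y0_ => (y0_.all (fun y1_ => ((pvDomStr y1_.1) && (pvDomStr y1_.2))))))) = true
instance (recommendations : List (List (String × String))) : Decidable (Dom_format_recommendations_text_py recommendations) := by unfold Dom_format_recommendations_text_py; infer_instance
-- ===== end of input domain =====

-- B replaces A's three per-priority filter passes with one stable sort by a numeric
-- priority rank followed by a single scan that emits a header when the rank changes
-- (alternative algorithm; same result by sort stability).

-- ===== PORT A =====
-- dict.get(k) / dict.get(k, dflt) on an association list (first match, like Python's dict lookup)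
def pvGet? (r : List (String × String)) (k : String) : Option String :=
  match r.find? (fun p => p.1 == k) with
  | some p => some p.2
  | none => none

def pvGetD (r : List (String × String)) (k dflt : String) : String :=
  match pvGet? r k with
  | some v => v
  | none => dflt

-- the five f-string lines emitted per recommendation (identical in both Pythons)
def pvRecLines (rec : List (String × String)) : List String :=
  ["• " ++ pvGetD rec "title" "Unknown",
   "  Category: " ++ pvGetD rec "category" "General",
   "  Description: " ++ pvGetD rec "description" "No description",
   "  Implementation: " ++ pvGetD rec "implementation" "See documentation",
   ""]

def format_recommendations_text_py (recommendations : List (List (String × String))) : List String :=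
  let lines := ["RECOMMENDATIONS", "========================================"]  -- "=" * 40
  if recommendations = [] then
    lines ++ ["• Continue regular security assessments",
              "• Keep all software and systems updated",
              "• Monitor for new vulnerabilities",
              ""]
  else
    let high := recommendations.filter (fun r => pvGet? r "priority" == some "High")
    let med  := recommendations.filter (fun r => pvGet? r "priority" == some "Medium")
    let low  := recommendations.filter (fun r => pvGet? r "priority" == some "Low")
    [(high, "High Priority"), (med, "Medium Priority"), (low, "Low Priority")].foldl
      (fun ls pg =>
        if pg.1 ≠ [] then
          pg.1.foldl (fun ls rec => ls ++ pvRecLines rec)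
            (ls ++ [pg.2 ++ " Recommendations:", ""])
        else ls)
      lines

-- ===== PORT B =====
-- _RANK.get(p, 3): rank of a priority value ('3' is never hit on the filtered list)
def pvRank (p : Option String) : Int :=
  if p == some "High" then 0 else if p == some "Medium" then 1
  else if p == some "Low" then 2 else 3

-- p in _RANK
def pvKnown (p : Option String) : Bool :=
  p == some "High" || p == some "Medium" || p == some "Low"

-- _TITLES[rank] for rank in {0,1,2}
def pvTitle (k : Int) : String :=
  if k == 0 then "High Priority" else if k == 1 then "Medium Priority" else "Low Priority"

-- one iteration of B's scan: state = (lines, prev)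
def pvStep (s : List String × Option Int) (rec : List (String × String)) : List String × Option Int :=
  let k := pvRank (pvGet? rec "priority")
  let s := if some k ≠ s.2 then (s.1 ++ [pvTitle k ++ " Recommendations:", ""], some k) else s
  (s.1 ++ pvRecLines rec, s.2)

def format_recommendations_text_py_alt (recommendations : List (List (String × String))) : List String :=
  let lines := ["RECOMMENDATIONS", "========================================"]
  if recommendations = [] then
    lines ++ ["• Continue regular security assessments",
              "• Keep all software and systems updated",
              "• Monitor for new vulnerabilities",
              ""]
  else
    let keyed := PySem.List.sorted
      (recommendations.filter (fun r => pvKnown (pvGet? r "priority")))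
      (fun r => pvRank (pvGet? r "priority"))
    (keyed.foldl pvStep (lines, none)).1

-- ===== PRECONDITION & SPEC =====
def Spec_format_recommendations_text_py (recommendations : List (List (String × String))) (out : List String) : Prop := out = format_recommendations_text_py_alt recommendations
instance (recommendations : List (List (String × String))) (out : List String) : Decidable (Spec_format_recommendations_text_py recommendations out) := by unfold Spec_format_recommendations_text_py; infer_instance

-- ===== CLAIM (what is proved, stated in full; the proofs are below) =====
def Claim_equal_format_recommendations_text_py : Prop := ∀ (recommendations : List (List (String × String))), Dom_format_recommendations_text_py recommendations → Spec_format_recommendations_text_py recommendations (format_recommendations_text_py recommendations)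

-- ===== LEMMAS AND PROOFS =====

-- insertBy skips a prefix it is not 'before'
theorem pv_insertBy_append {α : Type} (before : α → α → Bool) (x : α) (A rest : List α)
    (h : ∀ y ∈ A, before x y = false) :
    PySem.List.insertBy before x (A ++ rest) = A ++ PySem.List.insertBy before x rest := by
  induction A with
  | nil => simp
  | cons a t ih =>
    have ha : before x a = false := h a (by simp)
    simp only [List.cons_append, PySem.List.insertBy, ha, Bool.false_eq_true, if_false]
    simp [ih (fun y hy => h y (by simp [hy]))]

-- insertBy goes to the front of a list it is 'before'
theorem pv_insertBy_front {α : Type} (before : α → α → Bool) (x : α) (rest : List α)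
    (h : ∀ y ∈ rest, before x y = true) :
    PySem.List.insertBy before x rest = x :: rest := by
  cases rest with
  | nil => simp [PySem.List.insertBy]
  | cons a t => simp [PySem.List.insertBy, h a (by simp)]

-- stable bucket characterisation: sorting by a {0,1,2}-valued rank is the three filters concatenated
theorem pv_sorted_buckets {α : Type} (xs : List α) (key : α → Int)
    (h : ∀ x ∈ xs, key x = 0 ∨ key x = 1 ∨ key x = 2) :
    PySem.List.sorted xs key =
      xs.filter (fun x => key x == 0) ++ xs.filter (fun x => key x == 1)
        ++ xs.filter (fun x => key x == 2) := by
  rw [PySem.List.sorted_eq_foldl_insertBy]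
  induction xs using List.reverseRecOn with
  | nil => simp
  | append_singleton t x ih =>
    have ht : ∀ y ∈ t, key y = 0 ∨ key y = 1 ∨ key y = 2 := fun y hy => h y (by simp [hy])
    rw [List.foldl_append, List.foldl_cons, List.foldl_nil, ih ht]
    have m0 : ∀ y ∈ t.filter (fun x => key x == 0), key y = 0 := by
      intro y hy; simpa using (List.mem_filter.mp hy).2
    have m1 : ∀ y ∈ t.filter (fun x => key x == 1), key y = 1 := by
      intro y hy; simpa using (List.mem_filter.mp hy).2
    have m2 : ∀ y ∈ t.filter (fun x => key x == 2), key y = 2 := by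
      intro y hy; simpa using (List.mem_filter.mp hy).2
    rcases h x (by simp) with hx | hx | hx
    · rw [List.append_assoc,
          pv_insertBy_append _ _ _ _ (by intro y hy; simp [m0 y hy, hx]),
          pv_insertBy_front _ _ _ (by
            intro y hy
            rcases List.mem_append.mp hy with hy1 | hy2
            · simp [m1 y hy1, hx]
            · simp [m2 y hy2, hx])]
      simp [List.filter_append, hx]
    · rw [pv_insertBy_append _ _ (_ ++ _) _ (by
            intro y hy
            rcases List.mem_append.mp hy with hy0 | hy1
            · simp [m0 y hy0, hx]
            · simp [m1 y hy1, hx]),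
          pv_insertBy_front _ _ _ (by intro y hy; simp [m2 y hy, hx])]
      simp [List.filter_append, hx]
    · rw [PySem.List.insertBy_of_forall_not_before _ _ _ (by
            intro y hy
            rcases List.mem_append.mp hy with hy' | hy2
            · rcases List.mem_append.mp hy' with hy0 | hy1
              · simp [m0 y hy0, hx]
              · simp [m1 y hy1, hx]
            · simp [m2 y hy2, hx])]
      simp [List.filter_append, hx]

-- scanning a block whose rank equals prev just appends the record blocks
theorem pv_scan_same (L : List (List (String × String))) (k : Int)
    (h : ∀ r ∈ L, pvRank (pvGet? r "priority") = k) :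
    ∀ ls, L.foldl pvStep (ls, some k) = (ls ++ L.flatMap pvRecLines, some k) := by
  induction L with
  | nil => intro ls; simp
  | cons r t ih =>
    intro ls
    have hr : pvRank (pvGet? r "priority") = k := h r (by simp)
    simp only [List.foldl_cons, pvStep, hr, ne_eq, not_true_eq_false, if_false]
    rw [ih (fun y hy => h y (by simp [hy]))]
    simp [List.append_assoc]

-- scanning a non-empty block of rank k with prev ≠ k emits the header, then the blocks
theorem pv_scan_block (L : List (List (String × String))) (k : Int) (prev : Option Int)
    (hne : L ≠ []) (hp : some k ≠ prev)
    (h : ∀ r ∈ L, pvRank (pvGet? r "priority") = k) :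
    ∀ ls, L.foldl pvStep (ls, prev) =
      (ls ++ [pvTitle k ++ " Recommendations:", ""] ++ L.flatMap pvRecLines, some k) := by
  cases L with
  | nil => exact absurd rfl hne
  | cons r t =>
    intro ls
    have hr : pvRank (pvGet? r "priority") = k := h r (by simp)
    simp only [List.foldl_cons, pvStep, hr]
    rw [if_pos hp]
    rw [pv_scan_same t k (fun y hy => h y (by simp [hy]))]
    simp [List.append_assoc]

-- members of the three filtered groups have ranks 0, 1, 2
theorem pv_rank_of_mem_filter (recs : List (List (String × String))) (s : String) (k : Int)
    (hk : pvRank (some s) = k) :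
    ∀ r ∈ recs.filter (fun r => pvGet? r "priority" == some s),
      pvRank (pvGet? r "priority") = k := by
  intro r hr
  have := (List.mem_filter.mp hr).2
  simp only [beq_iff_eq] at this
  rw [this, hk]

-- the rank filter over the known-priority records is A's per-priority filter
theorem pv_bucket (recs : List (List (String × String))) (k : Int) (s : String)
    (hs : s = "High" ∧ k = 0 ∨ s = "Medium" ∧ k = 1 ∨ s = "Low" ∧ k = 2) :
    (recs.filter (fun r => pvKnown (pvGet? r "priority"))).filter
      (fun r => pvRank (pvGet? r "priority") == k)
      = recs.filter (fun r => pvGet? r "priority" == some s) := by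
  rw [List.filter_filter]
  apply List.filter_congr
  intro r _
  by_cases h1 : pvGet? r "priority" = some "High" <;>
    by_cases h2 : pvGet? r "priority" = some "Medium" <;>
      by_cases h3 : pvGet? r "priority" = some "Low" <;>
        rcases hs with ⟨rfl, rfl⟩ | ⟨rfl, rfl⟩ | ⟨rfl, rfl⟩ <;>
          simp_all [pvRank, pvKnown]

@[simp] theorem pv_title0 : pvTitle 0 = "High Priority" := rfl
@[simp] theorem pv_title1 : pvTitle 1 = "Medium Priority" := rfl
@[simp] theorem pv_title2 : pvTitle 2 = "Low Priority" := rfl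

-- ===== VERDICT (by name: the statement is the Claim_ definition above) =====
theorem format_recommendations_text_py_spec : Claim_equal_format_recommendations_text_py := by
  intro recs _
  unfold Spec_format_recommendations_text_py format_recommendations_text_py format_recommendations_text_py_alt
  by_cases h : recs = []
  · simp [h]
  · simp only [h, if_false, ite_not]
    -- name the three groups
    set F0 := recs.filter (fun r => pvGet? r "priority" == some "High") with hF0
    set F1 := recs.filter (fun r => pvGet? r "priority" == some "Medium") with hF1
    set F2 := recs.filter (fun r => pvGet? r "priority" == some "Low") with hF2
    -- B: the stable sort is the three groups concatenated
    have hkey : PySem.List.sorted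
        (recs.filter (fun r => pvKnown (pvGet? r "priority")))
        (fun r => pvRank (pvGet? r "priority")) = F0 ++ F1 ++ F2 := by
      rw [pv_sorted_buckets _ _ (by
        intro x hx
        have hk := (List.mem_filter.mp hx).2
        simp only [pvRank]
        split_ifs <;> simp_all [pvKnown])]
      rw [pv_bucket recs 0 "High" (by tauto), pv_bucket recs 1 "Medium" (by tauto),
          pv_bucket recs 2 "Low" (by tauto)]
    rw [hkey, List.foldl_append, List.foldl_append]
    -- rank facts for the members of each group
    have r0 := pv_rank_of_mem_filter recs "High" 0 rfl
    have r1 := pv_rank_of_mem_filter recs "Medium" 1 rfl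
    have r2 := pv_rank_of_mem_filter recs "Low" 2 rfl
    rw [← hF0] at r0; rw [← hF1] at r1; rw [← hF2] at r2
    -- A side: unfold the 3-element foldl and the per-group inner foldl
    simp only [List.foldl_cons, List.foldl_nil, PySem.List.foldl_append_eq_flatMap]
    by_cases h0 : F0 = [] <;> by_cases h1 : F1 = [] <;> by_cases h2 : F2 = [] <;>
      simp only [h0, h1, h2, if_true, if_false, List.foldl_nil] <;>
      first
      | rfl
      | (repeat'
          first
          | rw [pv_scan_block _ 0 none h0 (by simp) r0]
          | rw [pv_scan_block _ 1 none h1 (by simp) r1]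
          | rw [pv_scan_block _ 1 (some 0) h1 (by simp) r1]
          | rw [pv_scan_block _ 2 none h2 (by simp) r2]
          | rw [pv_scan_block _ 2 (some 0) h2 (by simp) r2]
          | rw [pv_scan_block _ 2 (some 1) h2 (by simp) r2])
        <;> simp [List.append_assoc]
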